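-- pv_equiv track=rewrite | github.com/UnexarT/IPO-lab_04 | test.py | equalElements
-- ===== SOURCE A (Python) =====
-- def equalElements(mas):
--     """
--     Функция, которая находит общие элементы во всех подсписках в списке списков.
--
--     :param mas: список списков
--     :return: множество общих элементов
--     """
--     seen = set()
--     if len(mas) == 0:
--         return seen  # Если нет списков, возвращаем пустое множество
--
--     for element in mas[0]:
--         count = 1
--         for lst in mas[1:]:
--             count += 1 if element in lst else False
--         if count == len(mas):
--             seen.add(element)  # Добавляем элемент только если он встречается во всех списках
--
--     return seen
-- ===== SOURCE B (Python) =====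
-- def equalElements(mas):
--     if len(mas) == 0:
--         return set()
--     counts = {}
--     for lst in mas:
--         for x in set(lst):
--             counts[x] = counts.get(x, 0) + 1
--     return {x for x, c in counts.items() if c == len(mas)}
-- ===== Notes on version B (the rewrite author's own statement) =====
-- stated objective: faster
-- what changed: Replaces A's per-element linear membership scan of every other sublist with one pass building a dict counting in how many sublists each element occurs, then a single filter pass keeping counts equal to len(mas).
import Mathlib
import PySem

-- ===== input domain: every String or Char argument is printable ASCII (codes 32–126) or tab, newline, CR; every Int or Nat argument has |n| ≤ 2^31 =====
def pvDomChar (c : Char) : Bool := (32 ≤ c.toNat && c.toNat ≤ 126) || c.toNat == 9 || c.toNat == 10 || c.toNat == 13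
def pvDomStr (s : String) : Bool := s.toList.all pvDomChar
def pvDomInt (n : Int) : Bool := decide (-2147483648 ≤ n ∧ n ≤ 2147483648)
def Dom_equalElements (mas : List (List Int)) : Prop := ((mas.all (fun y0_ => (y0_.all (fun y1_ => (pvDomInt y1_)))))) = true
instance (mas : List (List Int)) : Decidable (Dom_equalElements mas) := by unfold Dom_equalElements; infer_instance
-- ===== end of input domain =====

-- B replaces A's per-element scan of all other sublists with a one-pass dict counting
-- in how many sublists each element occurs, then one filter pass (objective: faster).

-- ===== PORT A =====
-- A: for each element of mas[0], count = 1 + (1 for each later sublist containing it);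
-- add to the result set when count == len(mas).
def equalElements (mas : List (List Int)) : List Int :=
  match mas with
  | [] => PySem.Set.empty
  | first :: rest =>
    first.foldl
      (fun seen element =>
        let count : Int :=
          rest.foldl (fun c lst => c + (if element ∈ lst then 1 else 0)) 1
        if count = ((first :: rest).length : Int) then PySem.Set.add seen element else seen)
      PySem.Set.empty

-- ===== PORT B =====
-- B: build counts : Dict Int Int over the distinct elements of each sublist, then keep
-- the keys whose count equals len(mas) (as a set).
def equalElements_alt (mas : List (List Int)) : List Int :=
  if mas.length = 0 then PySem.Set.empty
  else
    PySem.Set.ofList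
      (((((mas.foldl
              (fun d lst =>
                (PySem.Set.ofList lst).foldl (fun d x => d.insert x (d.getD x 0 + 1)) d)
              PySem.Dict.empty).items.filter
            (fun p => p.2 == (mas.length : Int))).map (fun p => p.1))))

-- ===== PRECONDITION & SPEC =====
def Spec_equalElements (mas : List (List Int)) (out : List Int) : Prop := out = equalElements_alt mas
instance (mas : List (List Int)) (out : List Int) : Decidable (Spec_equalElements mas out) := by unfold Spec_equalElements; infer_instance

-- ===== CLAIM (what is proved, stated in full; the proofs are below) =====
def Claim_equal_equalElements : Prop := ∀ (mas : List (List Int)), Dom_equalElements mas → Spec_equalElements mas (equalElements mas)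

-- ===== LEMMAS AND PROOFS =====

-- A conditional-add loop over l is Set.update with the filtered list.
theorem foldl_ite_add_eq_update (l : List Int) (q : Int → Bool) (s : PySem.Set Int) :
    l.foldl (fun s x => if q x then PySem.Set.add s x else s) s
      = PySem.Set.update s (l.filter q) := by
  induction l generalizing s with
  | nil => simp [PySem.Set.update_nil]
  | cons x xs ih =>
    by_cases hx : q x = true
    · simp [List.foldl_cons, hx, PySem.Set.update_cons, ih]
    · simp [List.foldl_cons, hx, ih]

-- ofList commutes with filter.
theorem ofList_filter (l : List Int) (p : Int → Bool) :
    PySem.Set.ofList (l.filter p) = (PySem.Set.ofList l).filter p := by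
  induction l using List.reverseRecOn with
  | nil => simp [PySem.Set.ofList_nil]
  | append_singleton xs x ih =>
    by_cases hp : p x = true
    · rw [List.filter_append, show List.filter p [x] = [x] by simp [hp],
        PySem.Set.ofList_append_singleton, PySem.Set.ofList_append_singleton, ih]
      by_cases hx : x ∈ xs
      · have h1 : x ∈ PySem.Set.ofList xs := (PySem.Set.mem_ofList _ _).2 hx
        have h2 : x ∈ (PySem.Set.ofList xs).filter p := List.mem_filter.2 ⟨h1, hp⟩
        rw [PySem.Set.add_of_mem h2, PySem.Set.add_of_mem h1]
      · have h1 : x ∉ PySem.Set.ofList xs := fun h => hx ((PySem.Set.mem_ofList _ _).1 h)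
        have h2 : x ∉ (PySem.Set.ofList xs).filter p := fun h => h1 (List.mem_filter.1 h).1
        rw [PySem.Set.add_of_not_mem h2, PySem.Set.add_of_not_mem h1,
          List.filter_append, show List.filter p [x] = [x] by simp [hp]]
    · rw [List.filter_append, show List.filter p [x] = ([] : List Int) by simp [hp],
        List.append_nil, PySem.Set.ofList_append_singleton, ih, PySem.Set.add_eq_ite]
      by_cases hx : x ∈ PySem.Set.ofList xs
      · rw [if_pos hx]
      · rw [if_neg hx, List.filter_append,
          show List.filter p [x] = ([] : List Int) by simp [hp], List.append_nil]

-- Inner counting loop of A.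
theorem count_loop (rest : List (List Int)) (x : Int) :
    rest.foldl (fun c lst => c + (if x ∈ lst then 1 else 0)) (1 : Int)
      = 1 + (rest.countP (fun lst => decide (x ∈ lst)) : Int) := by
  induction rest using List.reverseRecOn with
  | nil => simp
  | append_singleton ys y ih =>
    rw [List.foldl_append, List.foldl_cons, List.foldl_nil, ih, List.countP_append]
    by_cases h : x ∈ y
    · simp [h]
      ring
    · simp [h]

-- A's add condition holds iff x occurs in every sublist of rest.
theorem cond_iff (rest : List (List Int)) (x : Int) :
    (1 + (rest.countP (fun lst => decide (x ∈ lst)) : Int)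
        = ((rest.length + 1 : Nat) : Int))
      ↔ rest.all (fun lst => decide (x ∈ lst)) = true := by
  have hle : rest.countP (fun lst => decide (x ∈ lst)) ≤ rest.length :=
    List.countP_le_length
  rw [List.all_eq_true]
  constructor
  · intro h lst hl
    have hc : rest.countP (fun lst => decide (x ∈ lst)) = rest.length := by
      push_cast at h; omega
    have := (List.countP_eq_length).1 hc lst hl
    simpa using this
  · intro h
    have hc : rest.countP (fun lst => decide (x ∈ lst)) = rest.length :=
      List.countP_eq_length.2 (fun a ha => by simpa using h a ha)
    rw [hc]; push_cast; ring

-- count of k in the concatenated deduped sublists = number of sublists containing k.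
theorem count_flatMap (mas : List (List Int)) (k : Int) :
    (mas.flatMap (fun l => PySem.Set.ofList l)).count k
      = mas.countP (fun l => decide (k ∈ l)) := by
  induction mas with
  | nil => simp
  | cons l ls ih =>
    rw [List.flatMap_cons, List.count_append, ih, List.countP_cons]
    have hnd : (PySem.Set.ofList l).Nodup := PySem.Set.nodup_ofList l
    by_cases h : k ∈ l
    · have hk : k ∈ PySem.Set.ofList l := (PySem.Set.mem_ofList _ _).2 h
      rw [List.count_eq_one_of_mem hnd hk]
      simp [h]; omega
    · have hk : k ∉ PySem.Set.ofList l := fun hh => h ((PySem.Set.mem_ofList _ _).1 hh)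
      rw [List.count_eq_zero_of_not_mem hk]
      simp [h]

-- filtering the deduped concatenation by a predicate forcing membership in the first list
theorem filter_ofList_append (xs : List Int) (ys : List Int) (g : Int → Bool)
    (hg : ∀ k, g k = true → k ∈ xs) :
    (PySem.Set.ofList (xs ++ ys)).filter g = (PySem.Set.ofList xs).filter g := by
  rw [PySem.Set.ofList_append, PySem.Set.update_eq_append_filter, List.filter_append]
  have hnil : ((PySem.Set.ofList ys).filter
      (fun y => !(PySem.Set.contains (PySem.Set.ofList xs) y))).filter g = [] := by
    rw [List.filter_eq_nil_iff]
    intro a ha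
    have h1 := List.mem_filter.1 ha
    intro hga
    have hmem : a ∈ PySem.Set.ofList xs := (PySem.Set.mem_ofList _ _).2 (hg a hga)
    have hc := (PySem.Set.contains_iff _ _).2 hmem
    rw [hc] at h1
    simpa using h1.2
  rw [hnil, List.append_nil]

-- the same, applied to the concatenation coming from flatMap over (first :: rest)
theorem filter_flatMap_cons (first : List Int) (rest : List (List Int)) (g : Int → Bool)
    (hg : ∀ k, g k = true → k ∈ first) :
    (PySem.Set.ofList ((first :: rest).flatMap (fun l => PySem.Set.ofList l))).filter g
      = (PySem.Set.ofList first).filter g := by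
  rw [List.flatMap_cons,
    filter_ofList_append _ _ _ (fun k hk => (PySem.Set.mem_ofList _ _).2 (hg k hk)),
    PySem.Set.ofList_ofList]

-- B's count test is "k occurs in every sublist".
theorem count_full_iff (mas : List (List Int)) (k : Int) :
    (((mas.flatMap (fun l => PySem.Set.ofList l)).count k : Int)
        == ((mas.length : Nat) : Int)) = true
      ↔ ∀ l ∈ mas, k ∈ l := by
  rw [beq_iff_eq, Int.natCast_inj, count_flatMap]
  constructor
  · intro h l hl
    have := (List.countP_eq_length).1 h l hl
    simpa using this
  · intro h
    exact List.countP_eq_length.2 (fun l hl => by simpa using h l hl)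

-- B on a nonempty input, as a filter of the deduped concatenation.
theorem alt_eq_filter (first : List Int) (rest : List (List Int)) :
    equalElements_alt (first :: rest)
      = (PySem.Set.ofList ((first :: rest).flatMap (fun l => PySem.Set.ofList l))).filter
          (fun k => (((((first :: rest).flatMap (fun l => PySem.Set.ofList l)).count k : Nat) : Int)
              == (((first :: rest).length : Nat) : Int))) := by
  unfold equalElements_alt
  rw [if_neg (by simp)]
  have hcounter : ((first :: rest).foldl
        (fun d lst => (PySem.Set.ofList lst).foldl
          (fun d x => d.insert x (d.getD x 0 + 1)) d) PySem.Dict.empty)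
      = PySem.Dict.counter ((first :: rest).flatMap (fun l => PySem.Set.ofList l)) := by
    rw [← List.foldl_flatMap]
    exact PySem.Dict.foldl_insert_getD_add_one_eq_counter _
  rw [hcounter, PySem.Dict.items_counter, List.filter_map, List.map_map]
  rw [show (((fun p => p.1) : Int × Int → Int)
      ∘ fun k => (k, (((first :: rest).flatMap (fun l => PySem.Set.ofList l)).count k : Int))) = id
    from funext (fun k => rfl), List.map_id]
  simp only [Function.comp_def]
  exact PySem.Set.ofList_eq_self_of_nodup _ ((PySem.Set.nodup_ofList _).filter _)

-- A on a nonempty input, as the deduped filtered first sublist.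
theorem a_eq_filter (first : List Int) (rest : List (List Int)) :
    equalElements (first :: rest)
      = PySem.Set.ofList (first.filter (fun x => rest.all (fun lst => decide (x ∈ lst)))) := by
  unfold equalElements
  have hstep : (fun (seen : PySem.Set Int) element =>
      if (rest.foldl (fun c lst => c + (if element ∈ lst then 1 else 0)) 1)
          = (((first :: rest).length : Nat) : Int)
        then PySem.Set.add seen element else seen)
      = fun seen element =>
          if rest.all (fun lst => decide (element ∈ lst)) then PySem.Set.add seen element
          else seen := by
    funext s x
    rw [count_loop]
    simp only [List.length_cons]
    by_cases h : rest.all (fun lst => decide (x ∈ lst)) = true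
    · rw [if_pos ((cond_iff rest x).2 h), if_pos h]
    · rw [if_neg (fun hh => h ((cond_iff rest x).1 hh)), if_neg h]
  simp only [hstep]
  rw [show (PySem.Set.empty : PySem.Set Int) = [] from rfl,
    foldl_ite_add_eq_update, PySem.Set.update_nil_left]

-- ===== VERDICT (by name: the statement is the Claim_ definition above) =====
theorem equalElements_spec : Claim_equal_equalElements := by
  intro mas _
  unfold Spec_equalElements
  match mas with
  | [] => rfl
  | first :: rest =>
    have hcg : ∀ k ∈ PySem.Set.ofList first,
        ((((((first :: rest).flatMap (fun l => PySem.Set.ofList l)).count k : Nat) : Int))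
            == (((first :: rest).length : Nat) : Int))
          = rest.all (fun lst => decide (k ∈ lst)) := by
      intro k hk
      have hkf : k ∈ first := (PySem.Set.mem_ofList first k).1 hk
      rw [Bool.eq_iff_iff, count_full_iff, List.all_eq_true]
      constructor
      · intro h l hl
        simpa using h l (List.mem_cons_of_mem _ hl)
      · intro h l hl
        rcases List.mem_cons.1 hl with h1 | h1
        · subst h1; exact hkf
        · simpa using h l h1
    rw [a_eq_filter, alt_eq_filter]
    rw [filter_flatMap_cons _ _ _
      (fun k hk => (count_full_iff (first :: rest) k).1 hk first (List.mem_cons_self))]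
    rw [List.filter_congr hcg, ← ofList_filter]
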